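-- pv_equiv track=rewrite | github.com/ryansong612/academic_search | Models/Pinecone/IdeaGenerate/Researcher/Brain_Tools.py | separate_words_and_punctuations
-- ===== SOURCE A (Python) =====
-- import string
--
-- def separate_words_and_punctuations(input_string):
--     words = []
--     punctuations = []
--     word_buffer = []
--     for char in input_string:
--         if char in string.whitespace:
--             if word_buffer:
--                 words.append(''.join(word_buffer))
--                 word_buffer = []
--         elif char in string.punctuation:
--             if word_buffer:
--                 words.append(''.join(word_buffer))
--                 word_buffer = []
--             punctuations.append(char)
--         else:
--             word_buffer.append(char)
--
--     if word_buffer: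
--         words.append(''.join(word_buffer))
--     return words, punctuations
-- ===== SOURCE B (Python) =====
-- import string
--
-- def separate_words_and_punctuations(input_string):
--     seps = string.whitespace + string.punctuation
--     table = str.maketrans(seps, ' ' * len(seps))
--     words = input_string.translate(table).split()
--     punctuations = [c for c in input_string if c in string.punctuation]
--     return words, punctuations
-- ===== Notes on version B (the rewrite author's own statement) =====
-- stated objective: idiomatic
-- what changed: Replaces A's single interleaved state machine (word buffer flushed on separators) by two independent passes: words via translating every whitespace/punctuation character to a space and str.split(), punctuation via a filtering comprehension.
import Mathlib
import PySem

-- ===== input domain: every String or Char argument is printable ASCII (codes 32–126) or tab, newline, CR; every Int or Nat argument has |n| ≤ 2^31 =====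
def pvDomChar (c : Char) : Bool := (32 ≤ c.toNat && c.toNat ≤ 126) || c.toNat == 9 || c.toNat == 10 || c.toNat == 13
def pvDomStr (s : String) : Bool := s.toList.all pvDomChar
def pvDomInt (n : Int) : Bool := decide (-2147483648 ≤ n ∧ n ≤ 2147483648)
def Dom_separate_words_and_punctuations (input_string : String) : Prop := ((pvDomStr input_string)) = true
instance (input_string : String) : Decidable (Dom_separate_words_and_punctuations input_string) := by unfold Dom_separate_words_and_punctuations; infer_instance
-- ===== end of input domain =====

-- B replaces A's interleaved state machine by two independent passes: translate
-- separators to spaces and split() for the words, a filter for the punctuation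
-- (objective: more idiomatic; same asymptotic cost).

-- string.whitespace = ' \t\n\x0b\x0c\r' (single-char 'in' on a str = membership)
def pyWhitespace : List Char := [' ', '\t', '\n', '\x0b', '\x0c', '\r']
-- string.punctuation
def pyPunct : List Char := "!\"#$%&'()*+,-./:;<=>?@[\\]^_`{|}~".toList

-- ===== PORT A =====
-- one step of A's for-loop; state = (words, punctuations, word_buffer)
def sepStep (s : List String × List String × List Char) (c : Char) :
    List String × List String × List Char :=
  if pyWhitespace.contains c then
    if s.2.2.isEmpty then s else (s.1 ++ [String.ofList s.2.2], s.2.1, [])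
  else if pyPunct.contains c then
    ((if s.2.2.isEmpty then s.1 else s.1 ++ [String.ofList s.2.2]), s.2.1 ++ [c.toString], [])
  else (s.1, s.2.1, s.2.2 ++ [c])

def separate_words_and_punctuations (input_string : String) : List String × List String :=
  let st := input_string.toList.foldl sepStep ([], [], [])
  ((if st.2.2.isEmpty then st.1 else st.1 ++ [String.ofList st.2.2]), st.2.1)

-- ===== PORT B =====
-- the translate table: every whitespace/punctuation char ↦ ' '
def sepTr (c : Char) : Char :=
  if pyWhitespace.contains c || pyPunct.contains c then ' ' else c

def separate_words_and_punctuations_alt (input_string : String) : List String × List String :=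
  (PySem.Str.split₀ (String.ofList (input_string.toList.map sepTr)),
   (input_string.toList.filter (fun c => pyPunct.contains c)).map Char.toString)

-- ===== PRECONDITION & SPEC =====
def Spec_separate_words_and_punctuations (input_string : String) (out : List String × List String) : Prop := out = separate_words_and_punctuations_alt input_string
instance (input_string : String) (out : List String × List String) : Decidable (Spec_separate_words_and_punctuations input_string out) := by unfold Spec_separate_words_and_punctuations; infer_instance

-- ===== CLAIM (what is proved, stated in full; the proofs are below) =====
def Claim_equal_separate_words_and_punctuations : Prop := ∀ (input_string : String), Dom_separate_words_and_punctuations input_string → Spec_separate_words_and_punctuations input_string (separate_words_and_punctuations input_string)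

-- ===== LEMMAS AND PROOFS =====

-- split₀.go's accumulator is the reversed output built so far
theorem go_acc (cs : List Char) (cur : List Char) (acc : List (List Char)) :
    PySem.Chars.split₀.go cs cur acc = acc.reverse ++ PySem.Chars.split₀.go cs cur [] := by
  induction cs generalizing cur acc with
  | nil =>
    simp only [PySem.Chars.split₀.go]
    split_ifs <;> simp
  | cons c rest ih =>
    simp only [PySem.Chars.split₀.go]
    by_cases h1 : PySem.Chars.isspace c = true
    · simp only [h1, if_true]
      by_cases h2 : cur.isEmpty
      · simp only [h2, if_true]
        exact ih [] acc
      · rw [if_neg h2, if_neg h2,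
          ih [] (cur.reverse :: acc), ih [] [cur.reverse]]
        simp
    · rw [if_neg h1, if_neg h1]
      exact ih _ acc

theorem go_space (c : Char) (h : PySem.Chars.isspace c = true) (cs cur : List Char) :
    PySem.Chars.split₀.go (c :: cs) cur [] =
      (if cur = [] then [] else [cur.reverse]) ++ PySem.Chars.split₀.go cs [] [] := by
  simp only [PySem.Chars.split₀.go]
  rw [if_pos h]
  by_cases hb : cur = []
  · simp [hb]
  · rw [if_neg (by simpa [List.isEmpty_iff] using hb), go_acc cs [] [cur.reverse], if_neg hb]
    simp

theorem go_word (c : Char) (h : PySem.Chars.isspace c = false) (cs cur : List Char) :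
    PySem.Chars.split₀.go (c :: cs) cur [] = PySem.Chars.split₀.go cs (c :: cur) [] := by
  simp only [PySem.Chars.split₀.go]
  rw [if_neg (by simp [h])]

theorem ws_punct_disjoint (c : Char) (h : pyWhitespace.contains c = true) :
    pyPunct.contains c = false := by
  simp only [pyWhitespace, List.contains_eq_mem, List.mem_cons,
    List.not_mem_nil, or_false, decide_eq_true_eq] at h
  rcases h with h | h | h | h | h | h <;> subst h <;> decide

theorem isspace_of_sep (c : Char) (h : (pyWhitespace.contains c || pyPunct.contains c) = true) :
    PySem.Chars.isspace (sepTr c) = true := by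
  simp only [sepTr, h, if_true]
  decide

theorem not_isspace_of_word (c : Char) (hd : pvDomChar c = true)
    (hws : pyWhitespace.contains c = false) :
    PySem.Chars.isspace c = false := by
  simp only [pvDomChar, Bool.or_eq_true, Bool.and_eq_true, decide_eq_true_eq, beq_iff_eq] at hd
  simp only [pyWhitespace, List.contains_eq_mem, List.mem_cons,
    List.not_mem_nil, or_false, decide_eq_true_eq, Bool.eq_false_iff, Ne, not_or] at hws
  obtain ⟨h1, h2, h3, h4, h5, h6⟩ := hws
  simp only [Char.ext_iff, UInt32.ext_iff] at h1 h2 h3 h4 h5 h6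
  have e1 : (' ').val.toNat = 32 := rfl
  have e2 : ('\t').val.toNat = 9 := rfl
  have e3 : ('\n').val.toNat = 10 := rfl
  have e4 : ('\x0b').val.toNat = 11 := rfl
  have e5 : ('\x0c').val.toNat = 12 := rfl
  have e6 : ('\r').val.toNat = 13 := rfl
  rw [e1] at h1; rw [e2] at h2; rw [e3] at h3; rw [e4] at h4; rw [e5] at h5; rw [e6] at h6
  simp only [PySem.Chars.isspace, Bool.or_eq_false_iff, Bool.and_eq_false_iff,
    decide_eq_false_iff_not, Char.toNat] at *
  omega

-- main invariant relating A's loop state to B's split/filter passes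
theorem sep_invariant (cs : List Char) (hd : ∀ c ∈ cs, pvDomChar c = true)
    (ws ps : List String) (buf : List Char) :
    ((if (cs.foldl sepStep (ws, ps, buf)).2.2.isEmpty then (cs.foldl sepStep (ws, ps, buf)).1
        else (cs.foldl sepStep (ws, ps, buf)).1 ++ [String.ofList (cs.foldl sepStep (ws, ps, buf)).2.2]),
      (cs.foldl sepStep (ws, ps, buf)).2.1) =
    (ws ++ (PySem.Chars.split₀.go (cs.map sepTr) buf.reverse []).map String.ofList,
     ps ++ (cs.filter (fun c => pyPunct.contains c)).map Char.toString) := by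
  induction cs generalizing ws ps buf with
  | nil =>
    simp only [List.foldl_nil, List.map_nil, List.filter_nil, List.append_nil,
      PySem.Chars.split₀.go, List.isEmpty_reverse]
    by_cases hb : buf.isEmpty
    · simp [hb]
    · simp [hb]
  | cons c rest ih =>
    have hdc : pvDomChar c = true := hd c (List.mem_cons_self ..)
    have hdr : ∀ x ∈ rest, pvDomChar x = true := fun x hx => hd x (List.mem_cons_of_mem _ hx)
    simp only [List.foldl_cons, List.map_cons, List.filter_cons]
    by_cases hws : pyWhitespace.contains c = true
    · have hmw : c ∈ pyWhitespace := by simpa [List.contains_eq_mem] using hws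
      have hp : pyPunct.contains c = false := ws_punct_disjoint c hws
      have hsp : PySem.Chars.isspace (sepTr c) = true :=
        isspace_of_sep c (by rw [hws]; simp)
      have hstep : sepStep (ws, ps, buf) c =
          ((if buf.isEmpty then ws else ws ++ [String.ofList buf]), ps, []) := by
        by_cases hb : buf = []
        · subst hb; simp [sepStep, hmw]
        · simp [sepStep, hmw, hb, List.isEmpty_iff]
      rw [hstep, go_space (sepTr c) hsp, ih hdr _ ps [], hp]
      by_cases hb : buf.isEmpty
      · simp [List.isEmpty_iff] at hb
        simp [hb]
      · have hb' : buf ≠ [] := by simpa [List.isEmpty_iff] using hb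
        simp [hb, hb']
    · by_cases hpc : pyPunct.contains c = true
      · have hmw : c ∉ pyWhitespace := by simpa [List.contains_eq_mem] using hws
        have hmp : c ∈ pyPunct := by simpa [List.contains_eq_mem] using hpc
        have hsp : PySem.Chars.isspace (sepTr c) = true :=
          isspace_of_sep c (by rw [hpc]; simp)
        have hstep : sepStep (ws, ps, buf) c =
            ((if buf.isEmpty then ws else ws ++ [String.ofList buf]), ps ++ [c.toString], []) := by
          simp [sepStep, hmw, hmp, List.isEmpty_iff]
        rw [hstep, go_space (sepTr c) hsp, ih hdr _ _ [], hpc]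
        by_cases hb : buf.isEmpty
        · simp [List.isEmpty_iff] at hb
          simp [hb]
        · have hb' : buf ≠ [] := by simpa [List.isEmpty_iff] using hb
          simp [hb, hb']
      · have hmw : c ∉ pyWhitespace := by simpa [List.contains_eq_mem] using hws
        have hmp : c ∉ pyPunct := by simpa [List.contains_eq_mem] using hpc
        have htr : sepTr c = c := by
          simp [sepTr, hmw, hmp]
        have hsp : PySem.Chars.isspace (sepTr c) = false := by
          rw [htr]; exact not_isspace_of_word c hdc (by simpa using hws)
        have hstep : sepStep (ws, ps, buf) c = (ws, ps, buf ++ [c]) := by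
          simp [sepStep, hmw, hmp]
        rw [hstep, go_word (sepTr c) hsp, htr,
          show c :: buf.reverse = (buf ++ [c]).reverse by simp,
          ih hdr ws ps (buf ++ [c]), show pyPunct.contains c = false by simpa using hpc]
        simp

-- ===== VERDICT (by name: the statement is the Claim_ definition above) =====
theorem separate_words_and_punctuations_spec : Claim_equal_separate_words_and_punctuations := by
  intro s hdom
  unfold Spec_separate_words_and_punctuations
  have hd : ∀ c ∈ s.toList, pvDomChar c = true := by
    simpa [Dom_separate_words_and_punctuations, pvDomStr, List.all_eq_true] using hdom
  have h := sep_invariant s.toList hd [] [] []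
  simp only [List.reverse_nil, List.nil_append] at h
  unfold separate_words_and_punctuations separate_words_and_punctuations_alt
  rw [show (PySem.Str.split₀ (String.ofList (s.toList.map sepTr))) =
      (PySem.Chars.split₀ (s.toList.map sepTr)).map String.ofList by simp [PySem.Str.split₀]]
  simpa [PySem.Chars.split₀] using h
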